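-- pv_equiv track=rewrite | github.com/aadennis/PythonSandboxAA | MusicHandling/SongbookPro/ChordproToUltimate.py | chordpro_to_chord_lyrics
-- ===== SOURCE A (Python) =====
-- def chordpro_to_chord_lyrics(line):
--     chord_line = ""
--     lyric_line = ""
--     i = 0
--     while i < len(line):
--         if line[i] == "[":
--             end = line.find("]", i)
--             if end != -1:
--                 chord = line[i+1:end]
--                 # Place chord at current position in chord_line
--                 chord_line += " " * (len(lyric_line) - len(chord_line))
--                 chord_line += chord
--                 i = end + 1
--             else:
--                 lyric_line += line[i]
--                 i += 1
--         else:
--             lyric_line += line[i]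
--             i += 1
--     chord_line += " " * (len(lyric_line) - len(chord_line))
--     return chord_line.rstrip(), lyric_line.rstrip()
-- ===== SOURCE B (Python) =====
-- def chordpro_to_chord_lyrics(line):
--     # Phase 1: tokenize the line into lyric pieces and (lyric-position, chord) pairs.
--     lyric_parts = []
--     chords = []
--     pos = 0
--     lyric_len = 0
--     while True:
--         start = line.find('[', pos)
--         if start == -1:
--             lyric_parts.append(line[pos:])
--             break
--         end = line.find(']', start + 1)
--         if end == -1:
--             lyric_parts.append(line[pos:])
--             break
--         lyric_parts.append(line[pos:start])
--         lyric_len += start - pos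
--         chords.append((lyric_len, line[start + 1:end]))
--         pos = end + 1
--     lyric_line = ''.join(lyric_parts)
--     # Phase 2: lay out the chord line from the recorded positions.
--     chord_parts = []
--     cur = 0
--     for at, chord in chords:
--         if at > cur:
--             chord_parts.append(' ' * (at - cur))
--             cur = at
--         chord_parts.append(chord)
--         cur += len(chord)
--     return ''.join(chord_parts).rstrip(), lyric_line.rstrip()
-- ===== Notes on version B (the rewrite author's own statement) =====
-- stated objective: alternative
-- what changed: B replaces A's char-by-char while loop that interleaves scanning and layout with two phases: a find-driven tokenizer producing lyric pieces and (position, chord) pairs, then a fold that lays out the chord line from those pairs, joining string pieces instead of repeated concatenation.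
import Mathlib
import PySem

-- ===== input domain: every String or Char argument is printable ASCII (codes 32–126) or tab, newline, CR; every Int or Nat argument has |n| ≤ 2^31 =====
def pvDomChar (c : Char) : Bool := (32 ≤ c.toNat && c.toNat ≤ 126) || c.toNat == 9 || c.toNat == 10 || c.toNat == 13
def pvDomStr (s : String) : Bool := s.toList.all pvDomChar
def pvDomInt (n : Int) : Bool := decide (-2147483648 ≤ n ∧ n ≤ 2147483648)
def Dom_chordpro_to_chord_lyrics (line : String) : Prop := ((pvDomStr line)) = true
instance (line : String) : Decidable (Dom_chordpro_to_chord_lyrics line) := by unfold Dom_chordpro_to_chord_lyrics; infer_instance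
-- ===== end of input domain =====

-- B re-decomposes A's single interleaved scan into a tokenize phase and a layout phase; alternative structure, same exact result.

-- ===== PORT A =====
-- A's while loop over index i, ported as structural recursion on the suffix of the line at i;
-- line.find("]", i) searches from i, and line[i] = '[' ≠ ']', so it equals the find in the
-- suffix after i (offset i+1); chord = line[i+1:end] is rest.take e; " " * k is pyRepeat.
def pvALoop (cs cl ll : List Char) : List Char × List Char :=
  match cs with
  | [] => (cl, ll)
  | c :: rest =>
    if c = '[' then
      if PySem.Chars.find rest [']'] = -1 then
        pvALoop rest cl (ll ++ [c])
      else
        pvALoop (rest.drop ((PySem.Chars.find rest [']']).toNat + 1))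
          (cl ++ PySem.List.pyRepeat [' '] ((ll.length : Int) - (cl.length : Int))
              ++ rest.take (PySem.Chars.find rest [']']).toNat)
          ll
    else
      pvALoop rest cl (ll ++ [c])
termination_by cs.length
decreasing_by all_goals (simp; try omega)

def chordpro_to_chord_lyrics (line : String) : String × String :=
  let r := pvALoop line.toList [] []
  let cl := r.1 ++ PySem.List.pyRepeat [' '] ((r.2.length : Int) - (r.1.length : Int))
  (String.ofList (PySem.Chars.rstrip cl), String.ofList (PySem.Chars.rstrip r.2))

-- ===== PORT B =====
-- Source B's tokenizing while loop, ported as recursion on the suffix at pos; line.find('[', pos)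
-- is the find in the suffix, and line.find(']', start + 1) the find in the suffix after the '['.
def pvBScan (cs : List Char) (llen : Nat) (lyrAcc : List (List Char))
    (chAcc : List (Nat × List Char)) : List (List Char) × List (Nat × List Char) :=
  if hs : PySem.Chars.find cs ['['] = -1 then
    (lyrAcc ++ [cs], chAcc)
  else
    if he : PySem.Chars.find (cs.drop ((PySem.Chars.find cs ['[']).toNat + 1)) [']'] = -1 then
      (lyrAcc ++ [cs], chAcc)
    else
      pvBScan
        ((cs.drop ((PySem.Chars.find cs ['[']).toNat + 1)).drop
          ((PySem.Chars.find (cs.drop ((PySem.Chars.find cs ['[']).toNat + 1)) [']']).toNat + 1))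
        (llen + (PySem.Chars.find cs ['[']).toNat)
        (lyrAcc ++ [cs.take (PySem.Chars.find cs ['[']).toNat])
        (chAcc ++ [(llen + (PySem.Chars.find cs ['[']).toNat,
                    (cs.drop ((PySem.Chars.find cs ['[']).toNat + 1)).take
                      (PySem.Chars.find (cs.drop ((PySem.Chars.find cs ['[']).toNat + 1)) [']']).toNat)])
termination_by cs.length
decreasing_by
  have hnn : (0 : Int) ≤ PySem.Chars.find cs ['['] := by
    have := PySem.Chars.neg_one_le_find cs ['[']
    omega
  have hinf : (['['] : List Char) <:+: cs := (PySem.Chars.find_nonneg_iff cs ['[']).mp hnn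
  have hne : cs ≠ [] := by intro h; subst h; simp at hinf
  have h1 : 1 ≤ cs.length := by cases cs with | nil => exact absurd rfl hne | cons a t => simp
  simp
  omega

-- the body of Source B's for-loop over the chord pairs (chord_parts, cur as the state)
def pvLayoutStep (st : List (List Char) × Nat) (p : Nat × List Char) : List (List Char) × Nat :=
  let st1 := if p.1 > st.2 then (st.1 ++ [List.replicate (p.1 - st.2) ' '], p.1) else st
  (st1.1 ++ [p.2], st1.2 + p.2.length)

def chordpro_to_chord_lyrics_alt (line : String) : String × String :=
  let scan := pvBScan line.toList 0 [] []
  let lyricLine := PySem.Chars.join [] scan.1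
  let ph := scan.2.foldl pvLayoutStep ([], 0)
  (String.ofList (PySem.Chars.rstrip (PySem.Chars.join [] ph.1)),
   String.ofList (PySem.Chars.rstrip lyricLine))

-- ===== PRECONDITION & SPEC =====
def Spec_chordpro_to_chord_lyrics (line : String) (out : String × String) : Prop := out = chordpro_to_chord_lyrics_alt line
instance (line : String) (out : String × String) : Decidable (Spec_chordpro_to_chord_lyrics line out) := by unfold Spec_chordpro_to_chord_lyrics; infer_instance

-- ===== CLAIM (what is proved, stated in full; the proofs are below) =====
def Claim_equal_chordpro_to_chord_lyrics : Prop := ∀ (line : String), Dom_chordpro_to_chord_lyrics line → Spec_chordpro_to_chord_lyrics line (chordpro_to_chord_lyrics line)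

-- ===== LEMMAS AND PROOFS =====

-- proof-side helper: the chord line as A accumulates it, driven by B's (position, chord) pairs
def pvChordApply (cl : List Char) : List (Nat × List Char) → List Char
  | [] => cl
  | (at_, ch) :: t => pvChordApply (cl ++ List.replicate (at_ - cl.length) ' ' ++ ch) t

theorem pvFindChar_eq_neg_one_iff (cs : List Char) (c : Char) :
    PySem.Chars.find cs [c] = -1 ↔ c ∉ cs := by
  rw [PySem.Chars.find_eq_neg_one_iff]
  constructor
  · intro h hc
    obtain ⟨l1, l2, rfl⟩ := List.append_of_mem hc
    exact h ⟨l1, l2, by simp⟩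
  · intro h hinf
    exact h (hinf.sublist.subset (by simp))

theorem pvFindChar_decomp (cs : List Char) (c : Char)
    (h : ¬ PySem.Chars.find cs [c] = -1) :
    cs = cs.take (PySem.Chars.find cs [c]).toNat ++ c :: cs.drop ((PySem.Chars.find cs [c]).toNat + 1)
    ∧ (∀ x ∈ cs.take (PySem.Chars.find cs [c]).toNat, x ≠ c)
    ∧ (PySem.Chars.find cs [c]).toNat < cs.length := by
  have h0 : (0 : Int) ≤ PySem.Chars.find cs [c] := by
    have := PySem.Chars.neg_one_le_find cs [c]
    omega
  obtain ⟨hpre, hmin⟩ := PySem.Chars.find_spec h0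
  set n := (PySem.Chars.find cs [c]).toNat with hn
  obtain ⟨t, ht⟩ := hpre
  simp only [List.singleton_append] at ht
  have hdne : cs.drop n ≠ [] := by rw [← ht]; simp
  have hlt : n < cs.length := by
    by_contra hge
    exact hdne (List.drop_eq_nil_of_le (by omega))
  have hdrop1 : cs.drop (n + 1) = t := by
    have : cs.drop (n + 1) = (cs.drop n).drop 1 := by
      rw [List.drop_drop]
    rw [this, ← ht]
    simp
  refine ⟨?_, ?_, hlt⟩
  · conv_lhs => rw [← List.take_append_drop n cs]
    rw [← ht, hdrop1]
  · intro x hx hxc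
    subst hxc
    obtain ⟨i, hi, hget⟩ := List.mem_iff_getElem.mp hx
    have hi' : i < n := by
      have := hi
      simp at this
      omega
    have hilen : i < cs.length := by omega
    apply hmin i hi'
    refine ⟨cs.drop (i + 1), ?_⟩
    rw [List.singleton_append]
    rw [List.drop_eq_getElem_cons hilen]
    congr 1
    rw [← hget]
    exact List.getElem_take

theorem pvALoop_literal (pre : List Char) (h : ∀ x ∈ pre, x ≠ '[') :
    ∀ t cl ll, pvALoop (pre ++ t) cl ll = pvALoop t cl (ll ++ pre) := by
  induction pre with
  | nil => intro t cl ll; simp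
  | cons a pre ih =>
    intro t cl ll
    have ha : a ≠ '[' := h a (by simp)
    rw [List.cons_append, pvALoop.eq_def]
    simp only [ha, if_false]
    rw [ih (fun x hx => h x (by simp [hx])) t cl (ll ++ [a])]
    simp

theorem pvALoop_noClose (cs : List Char) (h : ']' ∉ cs) :
    ∀ cl ll, pvALoop cs cl ll = (cl, ll ++ cs) := by
  induction cs with
  | nil => intro cl ll; simp [pvALoop]
  | cons c rest ih =>
    intro cl ll
    have hrest : ']' ∉ rest := fun hm => h (by simp [hm])
    rw [pvALoop.eq_def]
    by_cases hc : c = '['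
    · have hfind : PySem.Chars.find rest [']'] = -1 :=
        (pvFindChar_eq_neg_one_iff rest ']').mpr hrest
      simp only [hc, if_true, hfind, if_pos rfl]
      rw [ih hrest]
      simp
    · simp only [hc, if_false]
      rw [ih hrest]
      simp

theorem pvBScan_acc (cs : List Char) (llen : Nat) (la0 : List (List Char))
    (ca0 : List (Nat × List Char)) : ∀ la ca,
    pvBScan cs llen la ca =
      (la ++ (pvBScan cs llen [] []).1, ca ++ (pvBScan cs llen [] []).2) := by
  induction cs, llen, la0, ca0 using pvBScan.induct with
  | case1 cs llen la0 ca0 hs =>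
    intro la ca
    have hB := pvBScan.eq_def cs llen ([] : List (List Char)) ([] : List (Nat × List Char))
    rw [dif_pos hs] at hB
    conv_lhs => rw [pvBScan.eq_def]
    rw [dif_pos hs, hB]
    simp
  | case2 cs llen la0 ca0 hs he =>
    intro la ca
    have hB := pvBScan.eq_def cs llen ([] : List (List Char)) ([] : List (Nat × List Char))
    rw [dif_neg hs, dif_pos he] at hB
    conv_lhs => rw [pvBScan.eq_def]
    rw [dif_neg hs, dif_pos he, hB]
    simp
  | case3 cs llen la0 ca0 hs he ih =>
    intro la ca
    have hB := pvBScan.eq_def cs llen ([] : List (List Char)) ([] : List (Nat × List Char))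
    rw [dif_neg hs, dif_neg he] at hB
    simp only [List.nil_append] at hB
    rw [ih] at hB
    conv_lhs => rw [pvBScan.eq_def]
    rw [dif_neg hs, dif_neg he]
    rw [ih, hB]
    simp

theorem pvMain (cs : List Char) (llen : Nat) (la0 : List (List Char))
    (ca0 : List (Nat × List Char)) : ∀ cl ll, ll.length = llen →
    pvALoop cs cl ll =
      (pvChordApply cl (pvBScan cs llen [] []).2,
       ll ++ (pvBScan cs llen [] []).1.flatten) := by
  induction cs, llen, la0, ca0 using pvBScan.induct with
  | case1 cs llen la0 ca0 hs =>
    intro cl ll hll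
    have hnomem : '[' ∉ cs := (pvFindChar_eq_neg_one_iff cs '[').mp hs
    have hB := pvBScan.eq_def cs llen ([] : List (List Char)) ([] : List (Nat × List Char))
    rw [dif_pos hs] at hB
    rw [hB]
    have hlit := pvALoop_literal cs (fun x hx hxe => hnomem (hxe ▸ hx)) [] cl ll
    rw [List.append_nil] at hlit
    rw [hlit]
    simp [pvALoop, pvChordApply]
  | case2 cs llen la0 ca0 hs he =>
    intro cl ll hll
    obtain ⟨hdec, hpre, hlt⟩ := pvFindChar_decomp cs '[' hs
    have hnoclose : ']' ∉ cs.drop ((PySem.Chars.find cs ['[']).toNat + 1) :=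
      (pvFindChar_eq_neg_one_iff _ ']').mp he
    have hB := pvBScan.eq_def cs llen ([] : List (List Char)) ([] : List (Nat × List Char))
    rw [dif_neg hs, dif_pos he] at hB
    rw [hB]
    conv_lhs => rw [hdec]
    rw [pvALoop_literal _ hpre]
    simp only [pvALoop]
    rw [if_true, if_pos he]
    rw [pvALoop_noClose _ hnoclose]
    simp only [pvChordApply, List.nil_append, List.flatten_cons, List.flatten_nil,
      List.append_nil]
    conv_rhs => rw [hdec]
    simp
  | case3 cs llen la0 ca0 hs he ih =>
    intro cl ll hll
    obtain ⟨hdec, hpre, hlt⟩ := pvFindChar_decomp cs '[' hs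
    obtain ⟨hdec2, hpre2, hlt2⟩ := pvFindChar_decomp _ ']' he
    have hB := pvBScan.eq_def cs llen ([] : List (List Char)) ([] : List (Nat × List Char))
    rw [dif_neg hs, dif_neg he] at hB
    simp only [List.nil_append] at hB
    conv at hB => rhs; rw [pvBScan_acc _ _ [] []]
    conv_lhs => rw [hdec]
    rw [pvALoop_literal _ hpre]
    simp only [pvALoop]
    rw [if_true, if_neg he]
    rw [ih _ _ (by simp [hll]; omega)]
    rw [hB]
    simp only [pvChordApply, List.flatten_cons, List.singleton_append]
    have hplen : (cs.take (PySem.Chars.find cs ['[']).toNat).length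
        = (PySem.Chars.find cs ['[']).toNat := by
      simp
      omega
    have hpad : PySem.List.pyRepeat [' ']
        (((ll ++ cs.take (PySem.Chars.find cs ['[']).toNat).length : Int) - (cl.length : Int))
        = List.replicate ((llen + (PySem.Chars.find cs ['[']).toNat) - cl.length) ' ' := by
      rw [PySem.List.pyRepeat_singleton]
      congr 1
      simp [hplen, hll]
      omega
    rw [hpad]
    simp [List.append_assoc, hplen, hll]

theorem pvPhase2 (chords : List (Nat × List Char)) :
    ∀ parts cur, cur = parts.flatten.length →
    (chords.foldl pvLayoutStep (parts, cur)).1.flatten = pvChordApply parts.flatten chords := by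
  induction chords with
  | nil => intro parts cur h; simp [pvChordApply]
  | cons p t ih =>
    intro parts cur h
    obtain ⟨at_, ch⟩ := p
    subst h
    simp only [List.foldl_cons, pvLayoutStep, pvChordApply]
    by_cases hgt : at_ > parts.flatten.length
    · rw [if_pos hgt]
      rw [ih _ _ (by simp at hgt ⊢; omega)]
      congr 1
      simp
    · rw [if_neg hgt]
      rw [ih _ _ (by simp)]
      have h0 : at_ - (List.map List.length parts).sum = 0 := by
        simp at hgt
        omega
      congr 1
      simp [h0]

theorem pvJoinNil (ps : List (List Char)) : PySem.Chars.join [] ps = ps.flatten := by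
  induction ps with
  | nil => simp [PySem.Chars.join, List.intercalate]
  | cons a t ih =>
    cases t with
    | nil => simp [PySem.Chars.join, List.intercalate]
    | cons b u =>
      simp only [PySem.Chars.join, List.intercalate] at ih ⊢
      simp only [List.intersperse_cons₂, List.flatten_cons] at ih ⊢
      simp [ih]

theorem pvRstripPad (x : List Char) (k : Nat) :
    PySem.Chars.rstrip (x ++ List.replicate k ' ') = PySem.Chars.rstrip x := by
  simp only [PySem.Chars.rstrip, List.reverse_append, List.reverse_replicate]
  congr 1
  induction k with
  | zero => simp
  | succ k ih =>
    rw [List.replicate_succ, List.cons_append, List.dropWhile_cons]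
    simpa using ih

-- ===== VERDICT (by name: the statement is the Claim_ definition above) =====
theorem chordpro_to_chord_lyrics_spec : Claim_equal_chordpro_to_chord_lyrics := by
  unfold Claim_equal_chordpro_to_chord_lyrics Spec_chordpro_to_chord_lyrics
  intro line _
  unfold chordpro_to_chord_lyrics chordpro_to_chord_lyrics_alt
  have hm := pvMain line.toList 0 [] [] [] [] (by simp)
  simp only [List.nil_append] at hm
  rw [hm]
  simp only [pvJoinNil]
  rw [pvPhase2 _ [] 0 (by simp)]
  rw [PySem.List.pyRepeat_singleton, pvRstripPad]
  simp [List.flatten]
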